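-- pv_equiv track=rewrite | github.com/geunhh/algorithm | 0903/ggg.py | check_subarray
-- ===== SOURCE A (Python) =====
-- def check_subarray(arr, max_val, min_val):
--     count_max = 0  # max 카운트
--     count_min = 0  # min 카운트
--
--     for num in arr:
--         if num == max_val:
--             count_max += 1
--         if num == min_val:
--             count_min += 1
--         # 최댓값이나 최솟값의 개수를 합친게 3이상이면 True로 반환 -> 'NO' 출력
--         if count_max + count_min >= 3:
--             return True
-- ===== SOURCE B (Python) =====
-- def check_subarray(arr, max_val, min_val):
--     # build a frequency histogram once, then answer with two O(1) lookups
--     freq = {}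
--     for x in arr:
--         freq[x] = freq.get(x, 0) + 1
--     if freq.get(max_val, 0) + freq.get(min_val, 0) >= 3:
--         return True
-- ===== Notes on version B (the rewrite author's own statement) =====
-- stated objective: alternative
-- what changed: Replaces A's per-element value comparisons with dual incremental counters and an early return by building a frequency dictionary (histogram) of the whole list once and answering with two dictionary lookups and one comparison.
import Mathlib
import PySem

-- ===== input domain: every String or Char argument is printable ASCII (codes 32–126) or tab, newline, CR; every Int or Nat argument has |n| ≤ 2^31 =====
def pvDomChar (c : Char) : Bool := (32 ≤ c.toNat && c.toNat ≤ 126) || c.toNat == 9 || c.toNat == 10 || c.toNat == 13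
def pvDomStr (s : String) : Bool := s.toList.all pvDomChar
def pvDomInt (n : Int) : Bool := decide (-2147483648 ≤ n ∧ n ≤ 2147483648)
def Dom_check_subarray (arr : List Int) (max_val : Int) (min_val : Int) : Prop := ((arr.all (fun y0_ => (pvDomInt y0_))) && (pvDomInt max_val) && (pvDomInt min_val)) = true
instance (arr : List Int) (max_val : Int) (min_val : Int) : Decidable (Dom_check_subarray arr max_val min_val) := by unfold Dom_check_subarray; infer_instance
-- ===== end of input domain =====

-- B replaces A's incremental dual-counter loop with early return by building a frequency dictionary of the whole list once and answering with two lookups (alternative data structure, same O(n) cost).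


-- ===== PORT A =====
-- the for-loop with early 'return True' as structural recursion over arr with the two counters as state
def check_subarray_go (max_val min_val : Int) : List Int → Int → Int → Option Bool
  | [], _, _ => none
  | num :: rest, count_max, count_min =>
    let count_max := if num == max_val then count_max + 1 else count_max
    let count_min := if num == min_val then count_min + 1 else count_min
    if count_max + count_min ≥ 3 then some true
    else check_subarray_go max_val min_val rest count_max count_min

def check_subarray (arr : List Int) (max_val : Int) (min_val : Int) : Option Bool :=
  check_subarray_go max_val min_val arr 0 0

-- ===== PORT B =====
-- freq[x] = freq.get(x, 0) + 1 over the whole list, then two freq.get lookups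
def check_subarray_alt (arr : List Int) (max_val : Int) (min_val : Int) : Option Bool :=
  let freq : PySem.Dict Int Int := arr.foldl (fun d x => d.insert x (d.getD x 0 + 1)) PySem.Dict.empty
  if freq.getD max_val 0 + freq.getD min_val 0 ≥ 3 then some true
  else none

-- ===== PRECONDITION & SPEC =====
def Spec_check_subarray (arr : List Int) (max_val : Int) (min_val : Int) (out : Option Bool) : Prop := out = check_subarray_alt arr max_val min_val
instance (arr : List Int) (max_val : Int) (min_val : Int) (out : Option Bool) : Decidable (Spec_check_subarray arr max_val min_val out) := by unfold Spec_check_subarray; infer_instance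

-- ===== CLAIM (what is proved, stated in full; the proofs are below) =====
def Claim_equal_check_subarray : Prop := ∀ (arr : List Int) (max_val : Int) (min_val : Int), Dom_check_subarray arr max_val min_val → Spec_check_subarray arr max_val min_val (check_subarray arr max_val min_val)

-- ===== LEMMAS AND PROOFS =====

-- Loop invariant for A: with accumulated counts cm, cn still below the threshold,
-- the loop returns some true iff the accumulated total plus the remaining counts reaches 3.
theorem check_subarray_go_eq (max_val min_val : Int) (xs : List Int) (cm cn : Int)
    (h : cm + cn < 3) :
    check_subarray_go max_val min_val xs cm cn =
      (if cm + cn + (xs.count max_val : Int) + (xs.count min_val : Int) ≥ 3 then some true else none) := by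
  induction xs generalizing cm cn with
  | nil => simp [check_subarray_go]; omega
  | cons x rest ih =>
    have hcnt : ∀ (v : Int), (((x :: rest).count v : Int))
        = (rest.count v : Int) + (if x = v then 1 else 0) := by
      intro v
      rw [List.count_cons]
      by_cases hv : x = v
      · subst hv; push_cast; simp
      · rw [if_neg (by simp [hv] : ¬(x == v) = true), if_neg hv]
        simp
    simp only [check_subarray_go, hcnt]
    by_cases hx : x = max_val <;> by_cases hv : x = min_val <;>
      simp only [hx, hv, beq_self_eq_true, beq_iff_eq,
        if_true, if_false] <;>
      split_ifs with h1 h2 <;>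
        first
          | rfl
          | (exfalso; omega)
          | (rw [ih _ _ (by omega)]; split_ifs with h3 <;>
              first | rfl | (exfalso; omega))

-- ===== VERDICT (by name: the statement is the Claim_ definition above) =====
theorem check_subarray_spec : Claim_equal_check_subarray := by
  intro arr max_val min_val _
  unfold Spec_check_subarray check_subarray check_subarray_alt
  rw [check_subarray_go_eq max_val min_val arr 0 0 (by omega)]
  simp only [PySem.Dict.getD_foldl_insert_add_one, PySem.Dict.getD_empty]
  split_ifs with h1 h2 <;> first | rfl | (exfalso; omega)
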